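-- pv_equiv track=rewrite | github.com/SungMinWoo/Algorithm | greedy_algorithm_clothes.py | solution
-- ===== SOURCE A (Python) =====
-- def solution(n, lost, reserve):
--     if list(set(lost) & set(reserve)) != 0:
--         new_lost = list(set(lost) - set(reserve))
--         new_reserve = list(set(reserve) - set(lost))
--     else:
--         new_lost = lost
--         new_reserve = reserve
--     new_reserve.sort()
--     new_lost.sort()
--     answer = n - len(new_lost)
--     for b in new_reserve:
--         for a in new_lost:
--             new_list = [a - 1, a, a + 1]
--             if b in new_list:
--                 answer += 1
--                 new_lost.remove(a)
--                 break
--     return answer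
-- ===== SOURCE B (Python) =====
-- def solution(n, lost, reserve):
--     # Two-pointer sweep over the sorted deduplicated lists: O(n log n)
--     L = sorted(set(lost) - set(reserve))
--     R = sorted(set(reserve) - set(lost))
--     ans = n - len(L)
--     i = j = 0
--     while i < len(L) and j < len(R):
--         if L[i] < R[j] - 1:
--             i += 1
--         elif L[i] > R[j] + 1:
--             j += 1
--         else:
--             ans += 1
--             i += 1
--             j += 1
--     return ans
-- ===== Notes on version B (the rewrite author's own statement) =====
-- stated objective: faster
-- what changed: Replaces the nested scan with repeated list.remove by a single two-pointer sweep over the sorted deduplicated lost/reserve lists.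
import Mathlib
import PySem

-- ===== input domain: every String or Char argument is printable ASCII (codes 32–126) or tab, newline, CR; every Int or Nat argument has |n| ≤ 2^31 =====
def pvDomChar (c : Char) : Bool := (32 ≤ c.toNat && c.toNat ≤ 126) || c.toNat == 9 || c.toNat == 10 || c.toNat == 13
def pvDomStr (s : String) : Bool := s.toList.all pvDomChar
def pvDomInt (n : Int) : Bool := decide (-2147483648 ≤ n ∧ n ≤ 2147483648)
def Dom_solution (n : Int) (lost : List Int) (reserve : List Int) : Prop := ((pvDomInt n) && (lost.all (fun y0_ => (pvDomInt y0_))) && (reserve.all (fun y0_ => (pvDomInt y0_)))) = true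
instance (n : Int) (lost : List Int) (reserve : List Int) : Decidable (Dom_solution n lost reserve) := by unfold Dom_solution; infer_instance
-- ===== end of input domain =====

-- B replaces A's nested scan with remove() by a two-pointer sweep over the sorted
-- deduplicated lists (objective: faster, asymptotic).

-- ===== PORT A =====
-- inner 'for a in new_lost: … if b in [a-1,a,a+1]: remove(a); break':
-- scans the list, on the first eligible a returns the list with that occurrence removed.
def pvInnerA (b : Int) : List Int → Option (List Int)
  | [] => none
  | a :: rest =>
      if b = a - 1 ∨ b = a ∨ b = a + 1 then some rest
      else (pvInnerA b rest).map (a :: ·)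

-- note: 'list(set(lost) & set(reserve)) != 0' is always True in Python (list vs int),
-- so A always takes the set-difference branch; list(set) order is consumed only by .sort().
def solution (n : Int) (lost : List Int) (reserve : List Int) : Int :=
  let new_lost := PySem.List.sorted (PySem.Set.diff (PySem.Set.ofList lost) (PySem.Set.ofList reserve)) (fun x => x) false
  let new_reserve := PySem.List.sorted (PySem.Set.diff (PySem.Set.ofList reserve) (PySem.Set.ofList lost)) (fun x => x) false
  (new_reserve.foldl
    (fun st b =>
      match pvInnerA b st.2 with
      | some L' => (st.1 + 1, L')
      | none => st)
    ((n - new_lost.length, new_lost) : Int × List Int)).1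

-- ===== PORT B =====
-- the while loop with indices i, j: structural two-pointer recursion on the two lists
def pvTP : List Int → List Int → Int
  | [], _ => 0
  | _ :: _, [] => 0
  | a :: L, b :: R =>
      if a < b - 1 then pvTP L (b :: R)
      else if a > b + 1 then pvTP (a :: L) R
      else 1 + pvTP L R
termination_by L R => L.length + R.length

def solution_alt (n : Int) (lost : List Int) (reserve : List Int) : Int :=
  let L := PySem.List.sorted (PySem.Set.diff (PySem.Set.ofList lost) (PySem.Set.ofList reserve)) (fun x => x) false
  let R := PySem.List.sorted (PySem.Set.diff (PySem.Set.ofList reserve) (PySem.Set.ofList lost)) (fun x => x) false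
  n - L.length + pvTP L R

-- ===== PRECONDITION & SPEC =====
def Spec_solution (n : Int) (lost : List Int) (reserve : List Int) (out : Int) : Prop := out = solution_alt n lost reserve
instance (n : Int) (lost : List Int) (reserve : List Int) (out : Int) : Decidable (Spec_solution n lost reserve out) := by unfold Spec_solution; infer_instance

-- ===== CLAIM (what is proved, stated in full; the proofs are below) =====
def Claim_equal_solution : Prop := ∀ (n : Int) (lost : List Int) (reserve : List Int), Dom_solution n lost reserve → Spec_solution n lost reserve (solution n lost reserve)

-- ===== LEMMAS AND PROOFS =====

-- A's outer loop, with the answer accumulator factored out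
def pvMatches : List Int → List Int → Int
  | _, [] => 0
  | L, b :: R =>
      match pvInnerA b L with
      | some L' => 1 + pvMatches L' R
      | none => pvMatches L R

theorem pv_foldl_eq (R : List Int) : ∀ (L : List Int) (c : Int),
    (R.foldl
      (fun st b =>
        match pvInnerA b st.2 with
        | some L' => (st.1 + 1, L')
        | none => st)
      ((c, L) : Int × List Int)).1 = c + pvMatches L R := by
  induction R with
  | nil => intro L c; simp [pvMatches]
  | cons b R ih =>
      intro L c
      simp only [List.foldl_cons, pvMatches]
      cases h : pvInnerA b L with
      | some L' => simp [ih L' (c + 1)]; ring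
      | none => simp [ih L c]

theorem pv_tp_nil_right (L : List Int) : pvTP L [] = 0 := by
  cases L <;> simp [pvTP]

theorem pv_innerA_none_of_gt (b : Int) (L : List Int) (h : ∀ x ∈ L, b + 1 < x) :
    pvInnerA b L = none := by
  induction L with
  | nil => rfl
  | cons a L ih =>
      have ha := h a (by simp)
      rw [pvInnerA, if_neg (by omega)]
      rw [ih (fun x hx => h x (by simp [hx]))]
      rfl

theorem pv_matches_cons_dead (R : List Int) : ∀ (a : Int) (L : List Int),
    (∀ b ∈ R, a < b - 1) → pvMatches (a :: L) R = pvMatches L R := by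
  induction R with
  | nil => intro a L _; rfl
  | cons b R ih =>
      intro a L hdead
      have hab : a < b - 1 := hdead b (by simp)
      rw [pvMatches, pvMatches, pvInnerA, if_neg (by omega)]
      cases h : pvInnerA b L with
      | some L' =>
          simp only [Option.map_some]
          rw [ih a L' (fun b' hb' => hdead b' (by simp [hb']))]
      | none =>
          simp only [Option.map_none]
          rw [ih a L (fun b' hb' => hdead b' (by simp [hb']))]

theorem pv_matches_eq_tp (R : List Int) (hR : R.Pairwise (· < ·)) :
    ∀ (L : List Int), L.Pairwise (· < ·) → pvMatches L R = pvTP L R := by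
  induction R with
  | nil => intro L _; rw [pv_tp_nil_right]; rfl
  | cons b R ihR =>
      have hRrest : R.Pairwise (· < ·) := hR.tail
      have hbR : ∀ b' ∈ R, b < b' := fun b' hb' => List.rel_of_pairwise_cons hR hb'
      intro L
      induction L with
      | nil =>
          intro _
          rw [pvMatches]
          simp only [pvInnerA]
          rw [ihR hRrest [] (by simp)]
          simp [pvTP]
      | cons a L ihL =>
          intro hL
          have hLrest : L.Pairwise (· < ·) := hL.tail
          have haL : ∀ x ∈ L, a < x := fun x hx => List.rel_of_pairwise_cons hL hx
          by_cases h1 : a < b - 1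
          · rw [pvTP, if_pos h1]
            rw [pv_matches_cons_dead (b :: R) a L
                (by intro b' hb'; rcases List.mem_cons.mp hb' with h | h
                    · omega
                    · have := hbR b' h; omega)]
            exact ihL hLrest
          · by_cases h2 : a > b + 1
            · rw [pvTP, if_neg h1, if_pos h2]
              rw [pvMatches]
              rw [pv_innerA_none_of_gt b (a :: L)
                  (by intro x hx; rcases List.mem_cons.mp hx with h | h
                      · omega
                      · have := haL x h; omega)]
              exact ihR hRrest (a :: L) hL
            · rw [pvTP, if_neg h1, if_neg h2]
              simp only [pvMatches, pvInnerA, if_pos (show b = a - 1 ∨ b = a ∨ b = a + 1 by omega)]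
              rw [ihR hRrest L hLrest]

theorem pv_sorted_nodup_pairwise_lt (xs : List Int) (hnd : xs.Nodup) :
    (PySem.List.sorted xs (fun x => x) false).Pairwise (· < ·) := by
  have hle : (PySem.List.sorted xs (fun x => x) false).Pairwise (fun a b => a ≤ b) :=
    PySem.List.sorted_pairwise xs (fun x => x)
  have hnd' : (PySem.List.sorted xs (fun x => x) false).Nodup :=
    (PySem.List.sorted_perm xs (fun x => x) false).nodup_iff.mpr hnd
  exact (hle.and hnd').imp (fun h => lt_of_le_of_ne h.1 h.2)

-- ===== VERDICT (by name: the statement is the Claim_ definition above) =====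
theorem solution_spec : Claim_equal_solution := by
  intro n lost reserve _
  unfold Spec_solution solution solution_alt
  have hndL : ((PySem.Set.ofList lost).diff (PySem.Set.ofList reserve)).Nodup :=
    PySem.Set.nodup_diff (PySem.Set.ofList lost) (PySem.Set.ofList reserve) (PySem.Set.nodup_ofList lost)
  have hndR : ((PySem.Set.ofList reserve).diff (PySem.Set.ofList lost)).Nodup :=
    PySem.Set.nodup_diff (PySem.Set.ofList reserve) (PySem.Set.ofList lost) (PySem.Set.nodup_ofList reserve)
  simp only []
  rw [pv_foldl_eq]
  rw [pv_matches_eq_tp _ (pv_sorted_nodup_pairwise_lt _ hndR) _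
      (pv_sorted_nodup_pairwise_lt _ hndL)]
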